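-- pv_equiv track=rewrite | github.com/Gjild/rfmna | src/rfmna/parser/design_bundle.py | _duplicate_identifier_counts
-- ===== SOURCE A (Python) =====
-- from collections.abc import Iterable, Iterator, Mapping, Sequence
--
-- def _duplicate_identifier_counts(values: Iterable[str]) -> tuple[tuple[str, int], ...]:
--     counts: dict[str, int] = {}
--     for value in values:
--         counts[value] = counts.get(value, 0) + 1
--     return tuple(
--         (identifier, counts[identifier])
--         for identifier in sorted(counts)
--         if counts[identifier] > 1
--     )
-- ===== SOURCE B (Python) =====
-- def _duplicate_identifier_counts(values):
--     s = sorted(values)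
--     out = []
--     i, n = 0, len(s)
--     while i < n:
--         j = i + 1
--         while j < n and s[j] == s[i]:
--             j += 1
--         if j - i > 1:
--             out.append((s[i], j - i))
--         i = j
--     return tuple(out)
-- ===== Notes on version B (the rewrite author's own statement) =====
-- stated objective: alternative
-- what changed: Replaces the count-dict accumulation plus sorted-keys filter with a sort-first run-length scan: sort all values once, then a two-pointer pass over the sorted list emits (value, run length) for every run longer than 1.
import Mathlib
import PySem

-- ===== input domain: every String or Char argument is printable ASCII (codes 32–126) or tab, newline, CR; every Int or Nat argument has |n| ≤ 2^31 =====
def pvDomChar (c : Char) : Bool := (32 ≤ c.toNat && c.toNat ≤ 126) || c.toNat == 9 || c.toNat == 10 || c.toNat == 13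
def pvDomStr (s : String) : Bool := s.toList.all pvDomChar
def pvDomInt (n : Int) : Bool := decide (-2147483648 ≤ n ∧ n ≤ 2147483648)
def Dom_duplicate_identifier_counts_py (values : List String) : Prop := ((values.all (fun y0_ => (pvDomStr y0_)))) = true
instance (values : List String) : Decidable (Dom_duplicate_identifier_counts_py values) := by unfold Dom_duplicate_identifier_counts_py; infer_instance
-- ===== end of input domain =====

-- B replaces A's count-dict + sorted-keys filter by a sort-first run-length scan (alternative
-- algorithm of the same cost); equivalence of the return values is proved for all inputs.

-- ===== PORT A =====
-- counts: dict[str,int] built by counts[value] = counts.get(value, 0) + 1, then a generator over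
-- sorted(counts) keeping keys with count > 1.  counts[identifier] is ported as getD _ 0, exact here
-- because every identifier comes from counts' own keys.
def duplicate_identifier_counts_py (values : List String) : List (String × Int) :=
  let counts : PySem.Dict String Int :=
    values.foldl (fun d value => d.insert value (d.getD value 0 + 1)) PySem.Dict.empty
  (PySem.List.sorted counts.keys (fun x => x)).filterMap
    (fun identifier =>
      if 1 < counts.getD identifier 0 then some (identifier, counts.getD identifier 0) else none)

-- ===== PORT B =====
-- The outer while-loop over the sorted list: each step consumes one run (the inner while that
-- advances j over equal elements is takeWhile/dropWhile) and emits (s[i], j - i) when j - i > 1.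
def dupRuns : List String → List (String × Int)
  | [] => []
  | v :: rest =>
      (if 1 < (1 + ((rest.takeWhile (fun x => x == v)).length : Int))
       then [(v, 1 + ((rest.takeWhile (fun x => x == v)).length : Int))] else [])
      ++ dupRuns (rest.dropWhile (fun x => x == v))
termination_by l => l.length
decreasing_by simpa using Nat.lt_succ_of_le (List.length_dropWhile_le _ _)

def duplicate_identifier_counts_py_alt (values : List String) : List (String × Int) :=
  dupRuns (PySem.List.sorted values (fun x => x))

-- ===== PRECONDITION & SPEC =====
def Spec_duplicate_identifier_counts_py (values : List String) (out : List (String × Int)) : Prop := out = duplicate_identifier_counts_py_alt values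
instance (values : List String) (out : List (String × Int)) : Decidable (Spec_duplicate_identifier_counts_py values out) := by unfold Spec_duplicate_identifier_counts_py; infer_instance

-- ===== CLAIM (what is proved, stated in full; the proofs are below) =====
def Claim_equal_duplicate_identifier_counts_py : Prop := ∀ (values : List String), Dom_duplicate_identifier_counts_py values → Spec_duplicate_identifier_counts_py values (duplicate_identifier_counts_py values)

-- ===== LEMMAS AND PROOFS =====

-- Set.add with an accumulator: elements seen by the fold never remove the front of the accumulator.
lemma foldl_add_cons (xs : List String) (v : String) :
    ∀ acc : List String, v ∉ xs →
      xs.foldl PySem.Set.add (v :: acc) = v :: xs.foldl PySem.Set.add acc := by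
  induction xs with
  | nil => intro acc _; rfl
  | cons x xs ih =>
      intro acc hv
      have hx : x ≠ v := fun h => hv (h ▸ List.mem_cons_self)
      have hadd : PySem.Set.add (v :: acc) x = v :: PySem.Set.add acc x := by
        simp [PySem.Set.add, PySem.Set.contains, hx]
        split <;> simp
      simp only [List.foldl_cons, hadd]
      exact ih _ (fun h => hv (List.mem_cons_of_mem _ h))

lemma foldl_add_run (t : List String) (v : String) (ht : ∀ x ∈ t, x = v) :
    t.foldl PySem.Set.add [v] = [v] := by
  induction t with
  | nil => rfl
  | cons x t ih =>
      have hx : x = v := ht x List.mem_cons_self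
      subst hx
      have : PySem.Set.add [x] x = [x] := by
        simp [PySem.Set.add, PySem.Set.contains]
      simp only [List.foldl_cons, this]
      exact ih (fun y hy => ht y (List.mem_cons_of_mem _ hy))

-- dedup of a sorted list beginning with the run of its head.
lemma dedup_run_cons (v : String) (t d : List String)
    (ht : ∀ x ∈ t, x = v) (hd : v ∉ d) :
    PySem.List.dedup (v :: (t ++ d)) = v :: PySem.List.dedup d := by
  simp only [PySem.List.dedup_eq_ofList, PySem.Set.ofList_eq_foldl]
  show (v :: (t ++ d)).foldl PySem.Set.add [] = v :: d.foldl PySem.Set.add []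
  have h0 : PySem.Set.add ([] : List String) v = [v] := by
    simp [PySem.Set.add, PySem.Set.contains]
  simp only [List.foldl_cons, h0, List.foldl_append, foldl_add_run t v ht]
  exact foldl_add_cons d v [] hd

-- dedup is a subsequence of its argument.
lemma foldl_add_sublist (xs : List String) :
    ∀ acc : List String, ∃ t, xs.foldl PySem.Set.add acc = acc ++ t ∧ t.Sublist xs := by
  induction xs with
  | nil => intro acc; exact ⟨[], by simp⟩
  | cons x xs ih =>
      intro acc
      by_cases h : x ∈ acc
      · obtain ⟨t, ht, hs⟩ := ih acc
        refine ⟨t, ?_, hs.cons x⟩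
        simpa [PySem.Set.add, PySem.Set.contains, h] using ht
      · obtain ⟨t, ht, hs⟩ := ih (acc ++ [x])
        refine ⟨x :: t, ?_, hs.cons₂ x⟩
        simpa [PySem.Set.add, PySem.Set.contains, h] using ht

lemma dedup_sublist (xs : List String) : (PySem.List.dedup xs).Sublist xs := by
  simp only [PySem.List.dedup_eq_ofList, PySem.Set.ofList_eq_foldl]
  obtain ⟨t, ht, hs⟩ := foldl_add_sublist xs []
  simpa [ht] using hs

-- the first element a dropWhile keeps fails the predicate
lemma dropWhile_head_false (p : String → Bool) {l l' : List String} {b : String}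
    (h : l.dropWhile p = b :: l') : p b = false := by
  have hnn : l.dropWhile p ≠ [] := by simp [h]
  have h1 := List.head_dropWhile_not p hnn
  simp only [h, List.head_cons] at h1
  exact h1

-- The run-length scan over a weakly sorted list computes dedup/count of that list.
lemma dupRuns_eq (s : List String) (hs : s.Pairwise (· ≤ ·)) :
    dupRuns s = (PySem.List.dedup s).filterMap
      (fun k => if 1 < (s.count k : Int) then some (k, (s.count k : Int)) else none) := by
  induction s using dupRuns.induct with
  | case1 => simp [dupRuns]
  | case2 v rest ih =>
      rw [dupRuns]
      have hrest : rest.takeWhile (fun x => x == v) ++ rest.dropWhile (fun x => x == v) = rest :=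
        List.takeWhile_append_dropWhile
      obtain ⟨t, htdef⟩ : ∃ t, rest.takeWhile (fun x => x == v) = t := ⟨_, rfl⟩
      obtain ⟨d, hddef⟩ : ∃ d, rest.dropWhile (fun x => x == v) = d := ⟨_, rfl⟩
      rw [htdef, hddef] at hrest ⊢
      rw [hddef] at ih
      have ht : ∀ x ∈ t, x = v := by
        intro x hx
        rw [← htdef] at hx
        exact eq_of_beq (List.mem_takeWhile_imp (p := fun y => y == v) hx)
      have hvle : ∀ x ∈ rest, v ≤ x := fun x hx => List.rel_of_pairwise_cons hs hx
      have hpr : rest.Pairwise (· ≤ ·) := hs.of_cons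
      have hpd : d.Pairwise (· ≤ ·) :=
        hpr.sublist (hddef ▸ List.dropWhile_sublist (fun x => x == v))
      have hdgt : ∀ x ∈ d, v < x := by
        rcases hde : d with _ | ⟨b, d'⟩
        · simp
        · have hne : (b == v) = false := dropWhile_head_false (fun x => x == v) (hddef.trans hde)
          have hbmem : b ∈ rest :=
            (hddef ▸ List.dropWhile_sublist (fun x => x == v)).mem (hde ▸ List.mem_cons_self)
          have hvb : v < b := lt_of_le_of_ne (hvle b hbmem) (fun h => by rw [← h] at hne; simp at hne)
          intro x hx
          rcases List.mem_cons.mp hx with rfl | hx'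
          · exact hvb
          · exact lt_of_lt_of_le hvb (List.rel_of_pairwise_cons (hde ▸ hpd) hx')
      have hvd : v ∉ d := fun h => lt_irrefl v (hdgt v h)
      have hcountv : ((v :: rest).count v : Int) = 1 + (t.length : Int) := by
        have h1 : t.count v = t.length := List.count_eq_length.mpr (fun b hb => (ht b hb).symm)
        have h2 : d.count v = 0 := List.count_eq_zero.mpr hvd
        rw [← hrest]
        simp [List.count_append, h1, h2]
        omega
      have hdedup : PySem.List.dedup (v :: rest) = v :: PySem.List.dedup d := by
        rw [← hrest]; exact dedup_run_cons v t d ht hvd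
      have hcongr : ∀ k ∈ PySem.List.dedup d,
          (if 1 < ((v :: rest).count k : Int) then some (k, ((v :: rest).count k : Int)) else none)
            = (if 1 < (d.count k : Int) then some (k, (d.count k : Int)) else none) := by
        intro k hk
        have hkd : k ∈ d := (PySem.List.mem_dedup d k).mp hk
        have hkv : k ≠ v := fun h => lt_irrefl v (h ▸ hdgt k hkd)
        have hkt : k ∉ t := fun h => hkv (ht k h)
        have : (v :: rest).count k = d.count k := by
          rw [← hrest]
          simp [List.count_append, Ne.symm hkv, List.count_eq_zero.mpr hkt]
        rw [this]
      rw [hdedup, List.filterMap_cons, List.filterMap_congr hcongr, ← ih hpd, hcountv]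
      split <;> simp

-- the A-side loop is the Counter, its keys the ordered set of values
lemma portA_eq (values : List String) :
    duplicate_identifier_counts_py values
      = (PySem.List.sorted (PySem.Set.ofList values) (fun x => x)).filterMap
          (fun k => if 1 < (values.count k : Int) then some (k, (values.count k : Int)) else none) := by
  unfold duplicate_identifier_counts_py
  simp only [PySem.Dict.foldl_insert_getD_add_one_eq_counter, PySem.Dict.keys_counter,
    PySem.Dict.getD_counter]

theorem duplicate_identifier_counts_py_spec_aux (values : List String) :
    duplicate_identifier_counts_py values = duplicate_identifier_counts_py_alt values := by
  set s := PySem.List.sorted values (fun x : String => x) with hsdef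
  have hperm : s.Perm values := PySem.List.sorted_perm values _ false
  have hpair : s.Pairwise (· ≤ ·) := PySem.List.sorted_pairwise values _
  have hdp : (PySem.List.dedup s).Pairwise (· < ·) := by
    have h1 : (PySem.List.dedup s).Pairwise (· ≤ ·) := hpair.sublist (dedup_sublist s)
    have h2 : (PySem.List.dedup s).Pairwise (· ≠ ·) := PySem.List.nodup_dedup s
    exact (h1.and h2).imp (fun h => lt_of_le_of_ne h.1 h.2)
  have hdperm : (PySem.List.dedup s).Perm (PySem.Set.ofList values) := by
    refine (List.perm_ext_iff_of_nodup (PySem.List.nodup_dedup s) (PySem.Set.nodup_ofList values)).mpr ?_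
    intro a
    rw [PySem.List.mem_dedup, PySem.Set.mem_ofList, hsdef, PySem.List.mem_sorted]
  have hsorted : PySem.List.sorted (PySem.Set.ofList values) (fun x : String => x)
      = PySem.List.dedup s := PySem.List.sorted_eq_of_perm_of_pairwise_lt _ _ _ hdperm hdp
  have hcount : ∀ k : String, values.count k = s.count k := fun k => (hperm.count_eq k).symm
  rw [portA_eq, hsorted, duplicate_identifier_counts_py_alt, ← hsdef,
    dupRuns_eq s hpair]
  exact List.filterMap_congr (fun k _ => by rw [hcount k])

-- ===== VERDICT (by name: the statement is the Claim_ definition above) =====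
theorem duplicate_identifier_counts_py_spec : Claim_equal_duplicate_identifier_counts_py := by
  intro values _
  exact duplicate_identifier_counts_py_spec_aux values
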